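-- pv_equiv track=rewrite | github.com/volodout/tochka | run.py | check_capacity
-- ===== SOURCE A (Python) =====
-- def check_capacity(max_capacity: int, guests: list) -> bool:
--     events = []
--
--     for guest in guests:
--         check_in = guest["check-in"]
--         check_out = guest["check-out"]
--         events.append((check_in, 1))
--         events.append((check_out, -1))
--
--     events.sort(key=lambda x: (x[0], x[1]))
--
--     current = 0
--     for i, change in events:
--         current += change
--         if current > max_capacity:
--             return False
--
--     return True
-- ===== SOURCE B (Python) =====
-- def check_capacity(max_capacity: int, guests: list) -> bool:
--     starts = []
--     ends = []
--     for guest in guests: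
--         starts.append(guest["check-in"])
--         ends.append(guest["check-out"])
--     starts.sort()
--     ends.sort()
--     current = 0
--     i = j = 0
--     while i < len(starts):
--         if j < len(ends) and ends[j] <= starts[i]:
--             current -= 1
--             j += 1
--         else:
--             current += 1
--             if current > max_capacity:
--                 return False
--             i += 1
--     return True
-- ===== Notes on version B (the rewrite author's own statement) =====
-- stated objective: alternative
-- what changed: Instead of building, key-sorting and sweeping a single (time, ±1) event list, B collects check-ins and check-outs into two separate lists, sorts each plainly, and runs a two-pointer merge sweep that maintains the current occupancy and fails on the first overflow.
import Mathlib
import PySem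

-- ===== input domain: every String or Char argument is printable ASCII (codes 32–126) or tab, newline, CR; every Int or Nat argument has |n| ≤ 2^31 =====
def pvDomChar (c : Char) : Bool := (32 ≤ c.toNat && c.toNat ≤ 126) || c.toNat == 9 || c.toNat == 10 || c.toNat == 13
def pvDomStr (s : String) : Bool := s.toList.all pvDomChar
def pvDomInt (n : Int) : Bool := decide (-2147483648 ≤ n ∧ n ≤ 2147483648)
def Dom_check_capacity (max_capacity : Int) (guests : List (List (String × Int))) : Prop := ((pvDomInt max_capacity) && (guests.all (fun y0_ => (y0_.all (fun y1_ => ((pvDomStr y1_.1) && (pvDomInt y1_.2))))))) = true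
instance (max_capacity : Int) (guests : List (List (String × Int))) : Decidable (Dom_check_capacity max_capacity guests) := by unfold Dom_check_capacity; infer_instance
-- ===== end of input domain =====

-- B replaces A's single sorted (time, ±1) event list with two independently sorted
-- start/end lists merged by a two-pointer sweep (objective: alternative decomposition).

-- ===== PORT A =====
-- A's final loop 'for i, change in events: current += change; if current > max_capacity: return False'
def pvLoopA (cap : Int) : List (Int × Int) → Int → Bool
  | [], _ => true
  | (_, change) :: rest, current =>
      if current + change > cap then false else pvLoopA cap rest (current + change)

-- guest["check-in"] raises KeyError when the key is absent: those inputs are outside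
-- Pre_check_capacity, so the default 0 of getD is never observed inside the claim.
def check_capacity (max_capacity : Int) (guests : List (List (String × Int))) : Bool :=
  let events := guests.foldl (fun acc guest =>
    let check_in := PySem.Dict.getD (PySem.Dict.ofList guest) "check-in" 0
    let check_out := PySem.Dict.getD (PySem.Dict.ofList guest) "check-out" 0
    acc ++ [(check_in, 1), (check_out, -1)]) []
  let events := PySem.List.sorted2 events (fun x => x.1) (fun x => x.2)
  pvLoopA max_capacity events 0

-- ===== PORT B =====
-- B's 'while i < len(starts)' two-pointer sweep, on the suffixes starts[i:], ends[j:]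
def pvGoB (cap : Int) : List Int → List Int → Int → Bool
  | [], _, _ => true
  | s :: ss, e :: es, current =>
      if e ≤ s then pvGoB cap (s :: ss) es (current - 1)
      else if current + 1 > cap then false
      else pvGoB cap ss (e :: es) (current + 1)
  | _ :: ss, [], current =>
      if current + 1 > cap then false else pvGoB cap ss [] (current + 1)
  termination_by ss es _ => ss.length + es.length

def check_capacity_alt (max_capacity : Int) (guests : List (List (String × Int))) : Bool :=
  let se := guests.foldl (fun acc guest =>
    (acc.1 ++ [PySem.Dict.getD (PySem.Dict.ofList guest) "check-in" 0],
     acc.2 ++ [PySem.Dict.getD (PySem.Dict.ofList guest) "check-out" 0])) ([], [])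
  pvGoB max_capacity (PySem.List.sorted se.1 (fun x => x)) (PySem.List.sorted se.2 (fun x => x)) 0

-- ===== PRECONDITION & SPEC =====
-- Pre_ excludes exactly the guests dicts missing a "check-in" or "check-out" key,
-- on which the Python A raises KeyError (B raises there too).
def Pre_check_capacity (max_capacity : Int) (guests : List (List (String × Int))) : Prop :=
  ∀ g ∈ guests, "check-in" ∈ g.map Prod.fst ∧ "check-out" ∈ g.map Prod.fst
instance (max_capacity : Int) (guests : List (List (String × Int))) : Decidable (Pre_check_capacity max_capacity guests) := by unfold Pre_check_capacity; infer_instance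

def pvWitness_check_capacity : Int × (List (List (String × Int))) :=
  (2, [[("check-in", 1), ("check-out", 3)], [("check-in", 2), ("check-out", 4)]])

def Spec_check_capacity (max_capacity : Int) (guests : List (List (String × Int))) (out : Bool) : Prop := out = check_capacity_alt max_capacity guests
instance (max_capacity : Int) (guests : List (List (String × Int))) (out : Bool) : Decidable (Spec_check_capacity max_capacity guests out) := by unfold Spec_check_capacity; infer_instance

-- ===== CLAIM (what is proved, stated in full; the proofs are below) =====
def Claim_equal_check_capacity : Prop := ∀ (max_capacity : Int) (guests : List (List (String × Int))), Dom_check_capacity max_capacity guests → Pre_check_capacity max_capacity guests → Spec_check_capacity max_capacity guests (check_capacity max_capacity guests)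

-- ===== LEMMAS AND PROOFS =====

-- the lexicographic order Python's tuple key (x[0], x[1]) sorts by
def pvLe (a b : Int × Int) : Prop := a.1 < b.1 ∨ (a.1 = b.1 ∧ a.2 ≤ b.2)

theorem pvLe_antisymm (a b : Int × Int) (h1 : pvLe a b) (h2 : pvLe b a) : a = b := by
  obtain ⟨x, y⟩ := a; obtain ⟨u, v⟩ := b
  simp only [pvLe] at h1 h2
  have : x = u ∧ y = v := by omega
  simp [this.1, this.2]

-- the merged event stream: sorted starts and sorted ends interleaved, end-before-start on ties
def pvMergeP : List Int → List Int → List (Int × Int)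
  | [], es => es.map (fun e => (e, -1))
  | s :: ss, [] => (s :: ss).map (fun s => (s, 1))
  | s :: ss, e :: es =>
      if e ≤ s then (e, -1) :: pvMergeP (s :: ss) es
      else (s, 1) :: pvMergeP ss (e :: es)
  termination_by ss es => ss.length + es.length

theorem pvMergeP_nil (es : List Int) : pvMergeP [] es = es.map (fun e => (e, -1)) := by
  rw [pvMergeP.eq_def]

theorem pvMergeP_cons_nil (s : Int) (ss : List Int) :
    pvMergeP (s :: ss) [] = (s :: ss).map (fun s => (s, 1)) := by
  rw [pvMergeP.eq_def]

theorem pvMergeP_cons_cons (s e : Int) (ss es : List Int) :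
    pvMergeP (s :: ss) (e :: es) =
      if e ≤ s then (e, -1) :: pvMergeP (s :: ss) es
      else (s, 1) :: pvMergeP ss (e :: es) := by
  rw [pvMergeP.eq_def]

theorem pvGoB_nil (cap : Int) (es : List Int) (cur : Int) : pvGoB cap [] es cur = true := by
  rw [pvGoB.eq_def]

theorem pvGoB_cons_cons (cap s e : Int) (ss es : List Int) (cur : Int) :
    pvGoB cap (s :: ss) (e :: es) cur =
      if e ≤ s then pvGoB cap (s :: ss) es (cur - 1)
      else if cur + 1 > cap then false
      else pvGoB cap ss (e :: es) (cur + 1) := by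
  rw [pvGoB.eq_def]

theorem pvGoB_cons_nil (cap s : Int) (ss : List Int) (cur : Int) :
    pvGoB cap (s :: ss) [] cur =
      if cur + 1 > cap then false else pvGoB cap ss [] (cur + 1) := by
  rw [pvGoB.eq_def]

theorem pvMergeP_perm (ss es : List Int) :
    (pvMergeP ss es).Perm (ss.map (fun s => (s, 1)) ++ es.map (fun e => (e, -1))) := by
  fun_induction pvMergeP ss es with
  | case1 es => simp
  | case2 s ss => simp
  | case3 s ss e es h ih =>
      exact ((ih.cons _).trans (List.perm_middle.symm)).trans (by simp)
  | case4 s ss e es h ih =>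
      exact (ih.cons ((s : Int), (1 : Int))).trans (by simp)

theorem pvMergeP_pairwise (ss es : List Int)
    (hss : ss.Pairwise (· ≤ ·)) (hes : es.Pairwise (· ≤ ·)) :
    (pvMergeP ss es).Pairwise pvLe := by
  fun_induction pvMergeP ss es with
  | case1 es =>
      exact List.pairwise_map.mpr (hes.imp (fun h => by simp only [pvLe]; omega))
  | case2 s ss =>
      exact List.pairwise_map.mpr (hss.imp (fun h => by simp only [pvLe]; omega))
  | case3 s ss e es h ih =>
      refine List.Pairwise.cons ?_ (ih hss hes.of_cons)
      intro x hx
      have hx' := (pvMergeP_perm (s :: ss) es).mem_iff.mp hx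
      rcases List.mem_append.mp hx' with hl | hr
      · obtain ⟨s', hs', rfl⟩ := List.mem_map.mp hl
        have : s ≤ s' := by
          rcases hs' with _ | hs'
          · rfl
          · exact List.rel_of_pairwise_cons hss (by assumption)
        simp only [pvLe]; omega
      · obtain ⟨e', he', rfl⟩ := List.mem_map.mp hr
        have : e ≤ e' := List.rel_of_pairwise_cons hes he'
        simp only [pvLe]; omega
  | case4 s ss e es h ih =>
      refine List.Pairwise.cons ?_ (ih hss.of_cons hes)
      intro x hx
      have hx' := (pvMergeP_perm ss (e :: es)).mem_iff.mp hx
      rcases List.mem_append.mp hx' with hl | hr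
      · obtain ⟨s', hs', rfl⟩ := List.mem_map.mp hl
        have : s ≤ s' := List.rel_of_pairwise_cons hss hs'
        simp only [pvLe]; omega
      · obtain ⟨e', he', rfl⟩ := List.mem_map.mp hr
        have : e ≤ e' := by
          rcases he' with _ | he'
          · rfl
          · exact List.rel_of_pairwise_cons hes (by assumption)
        simp only [pvLe]; omega

-- insertion with sorted2's lexicographic 'before' preserves Pairwise pvLe
theorem pvInsertBy_pairwise (x : Int × Int) (ys : List (Int × Int))
    (h : ys.Pairwise pvLe) :
    (PySem.List.insertBy
      (fun a b => decide (a.1 < b.1) || (!decide (b.1 < a.1) && decide (a.2 < b.2))) x ys).Pairwise pvLe := by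
  induction ys with
  | nil => simp [PySem.List.insertBy]
  | cons y ys ih =>
      rw [PySem.List.insertBy]
      by_cases hb : (decide (x.1 < y.1) || (!decide (y.1 < x.1) && decide (x.2 < y.2))) = true
      · rw [if_pos hb]
        have hxy : pvLe x y := by
          simp only [Bool.or_eq_true, Bool.and_eq_true, Bool.not_eq_true', decide_eq_true_eq,
            decide_eq_false_iff_not] at hb
          simp only [pvLe]; omega
        refine List.Pairwise.cons ?_ h
        intro z hz
        rcases hz with _ | hz
        · exact hxy
        · have hyz : pvLe y z := List.rel_of_pairwise_cons h (by assumption)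
          simp only [pvLe] at hxy hyz ⊢; omega
      · rw [if_neg hb]
        refine List.Pairwise.cons ?_ (ih h.of_cons)
        intro z hz
        rcases (PySem.List.insertBy_mem_iff _ _ _ _).mp hz with rfl | hz
        · simp only [Bool.or_eq_true, Bool.and_eq_true, Bool.not_eq_true', decide_eq_true_eq,
            decide_eq_false_iff_not] at hb
          simp only [pvLe]; omega
        · exact List.rel_of_pairwise_cons h hz

theorem pvSorted2_pairwise (xs : List (Int × Int)) :
    (PySem.List.sorted2 xs (fun x => x.1) (fun x => x.2)).Pairwise pvLe := by
  show (List.foldl _ [] xs).Pairwise pvLe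
  generalize hacc : ([] : List (Int × Int)) = acc
  have hp : acc.Pairwise pvLe := by rw [← hacc]; simp
  clear hacc
  induction xs generalizing acc with
  | nil => simpa using hp
  | cons x xs ih => exact ih _ (pvInsertBy_pairwise x acc hp)

-- A's event-building fold, closed form
theorem pvFoldA (f h : List (String × Int) → Int) (gs : List (List (String × Int)))
    (acc : List (Int × Int)) :
    gs.foldl (fun acc g => acc ++ [(f g, 1), (h g, -1)]) acc
      = acc ++ gs.flatMap (fun g => [(f g, 1), (h g, -1)]) := by
  induction gs generalizing acc with
  | nil => simp
  | cons g gs ih => simp [ih]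

-- B's starts/ends-building fold, closed form
theorem pvFoldB (f h : List (String × Int) → Int) (gs : List (List (String × Int)))
    (acc : List Int × List Int) :
    gs.foldl (fun acc g => (acc.1 ++ [f g], acc.2 ++ [h g])) acc
      = (acc.1 ++ gs.map f, acc.2 ++ gs.map h) := by
  induction gs generalizing acc with
  | nil => simp
  | cons g gs ih => simp [ih]

theorem pvFlatMap_perm (f h : List (String × Int) → Int) (gs : List (List (String × Int))) :
    (gs.flatMap (fun g => [(f g, 1), (h g, -1)])).Perm
      ((gs.map f).map (fun s => (s, (1 : Int))) ++ (gs.map h).map (fun e => (e, (-1 : Int)))) := by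
  induction gs with
  | nil => simp
  | cons g gs ih =>
      simp only [List.flatMap_cons, List.map_cons, List.cons_append]
      exact (((ih.cons _).trans List.perm_middle.symm).cons _).trans (by simp)

-- the key identity: A's keyed sort of the interleaved events IS the two-pointer merge
theorem pvSortedEqMerge (f h : List (String × Int) → Int) (gs : List (List (String × Int))) :
    PySem.List.sorted2 (gs.flatMap (fun g => [(f g, 1), (h g, -1)])) (fun x => x.1) (fun x => x.2)
      = pvMergeP (PySem.List.sorted (gs.map f) (fun x => x))
                 (PySem.List.sorted (gs.map h) (fun x => x)) := by
  apply List.Perm.eq_of_pairwise (le := pvLe)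
    (fun a b _ _ => pvLe_antisymm a b)
    (pvSorted2_pairwise _)
    (pvMergeP_pairwise _ _
      (by simpa using PySem.List.sorted_pairwise (gs.map f) (fun x => x))
      (by simpa using PySem.List.sorted_pairwise (gs.map h) (fun x => x)))
  refine ((PySem.List.sorted2_perm _ _ _ _).trans (pvFlatMap_perm f h gs)).trans ?_
  refine List.Perm.trans ?_ (pvMergeP_perm _ _).symm
  exact (((PySem.List.sorted_perm (gs.map f) (fun x => x) false).map _).append
    ((PySem.List.sorted_perm (gs.map h) (fun x => x) false).map _)).symm

-- A's loop returns true on a trailing all-(-1) suffix once current ≤ cap + 1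
theorem pvLoopA_ends (cap : Int) (es : List Int) (cur : Int) (h : cur ≤ cap + 1) :
    pvLoopA cap (es.map (fun e => (e, -1))) cur = true := by
  induction es generalizing cur with
  | nil => simp [pvLoopA]
  | cons e es ih =>
      rw [List.map_cons, pvLoopA, if_neg (by omega)]
      exact ih _ (by omega)

-- the sweep correspondence: B's two-pointer loop = A's loop over the merged events
theorem pvM1 (cap : Int) (ss es : List Int) (cur : Int) (h : cur ≤ cap + 1) :
    pvGoB cap ss es cur = pvLoopA cap (pvMergeP ss es) cur := by
  induction ss generalizing es cur with
  | nil => rw [pvGoB_nil, pvMergeP_nil, pvLoopA_ends cap es cur h]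
  | cons s ss ihs =>
      induction es generalizing cur with
      | nil =>
          rw [pvGoB_cons_nil, pvMergeP_cons_nil, List.map_cons, pvLoopA]
          by_cases hc : cur + 1 > cap
          · rw [if_pos hc, if_pos hc]
          · rw [if_neg hc, if_neg hc, ihs [] (cur + 1) (by omega)]
            cases ss <;> simp [pvMergeP_nil, pvMergeP_cons_nil]
      | cons e es ihe =>
          rw [pvGoB_cons_cons, pvMergeP_cons_cons]
          by_cases he : e ≤ s
          · rw [if_pos he, if_pos he, pvLoopA, if_neg (by omega)]
            exact ihe _ (by omega)
          · rw [if_neg he, if_neg he, pvLoopA]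
            by_cases hc : cur + 1 > cap
            · rw [if_pos hc, if_pos hc]
            · rw [if_neg hc, if_neg hc]
              exact ihs _ _ (by omega)

-- B's loop must fail when the final occupancy already exceeds cap
theorem pvGoB_false (cap : Int) (ss es : List Int) (cur : Int)
    (hne : ss ≠ []) (hq : cur + ss.length - es.length > cap) :
    pvGoB cap ss es cur = false := by
  induction ss generalizing es cur with
  | nil => exact absurd rfl hne
  | cons s ss ihs =>
      induction es generalizing cur with
      | nil =>
          rw [pvGoB_cons_nil]
          by_cases hc : cur + 1 > cap
          · rw [if_pos hc]
          · rw [if_neg hc]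
            rcases ss with _ | ⟨s', ss⟩
            · exfalso; simp only [List.length_cons, List.length_nil] at hq; omega
            · exact ihs _ _ (List.cons_ne_nil _ _) (by simp only [List.length_cons, List.length_nil] at hq ⊢; omega)
      | cons e es ihe =>
          rw [pvGoB_cons_cons]
          by_cases he : e ≤ s
          · rw [if_pos he]
            exact ihe _ (by simp only [List.length_cons] at hq ⊢; omega)
          · rw [if_neg he]
            by_cases hc : cur + 1 > cap
            · rw [if_pos hc]
            · rw [if_neg hc]
              rcases ss with _ | ⟨s', ss⟩
              · exfalso; simp only [List.length_cons, List.length_nil] at hq; omega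
              · exact ihs _ _ (List.cons_ne_nil _ _) (by simp only [List.length_cons] at hq ⊢; omega)

-- ===== VERDICT (by name: the statement is the Claim_ definition above) =====
theorem check_capacity_spec : Claim_equal_check_capacity := by
  intro cap guests _hdom _hpre
  unfold Spec_check_capacity check_capacity check_capacity_alt
  simp only [pvFoldA, pvFoldB, List.nil_append]
  rw [pvSortedEqMerge]
  by_cases hcap : (0 : Int) ≤ cap + 1
  · exact (pvM1 cap _ _ 0 hcap).symm
  · rcases hg : guests with _ | ⟨g, gs⟩
    · have h0 : PySem.List.sorted (([] : List (List (String × Int))).map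
          (fun g => PySem.Dict.getD (PySem.Dict.ofList g) "check-in" 0)) (fun x => x) = [] := rfl
      have h1 : PySem.List.sorted (([] : List (List (String × Int))).map
          (fun g => PySem.Dict.getD (PySem.Dict.ofList g) "check-out" 0)) (fun x => x) = [] := rfl
      rw [h0, h1, pvGoB_nil, pvMergeP_nil]
      simp [pvLoopA]
    · have hlen : ∀ (f : List (String × Int) → Int),
          (PySem.List.sorted (((g :: gs).map f)) (fun x => x)).length = gs.length + 1 := by
        intro f; rw [PySem.List.length_sorted]; simp
      have hBne : PySem.List.sorted (((g :: gs).map (fun g =>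
          PySem.Dict.getD (PySem.Dict.ofList g) "check-in" 0))) (fun x => x) ≠ [] := by
        intro hnil; have := hlen (fun g => PySem.Dict.getD (PySem.Dict.ofList g) "check-in" 0)
        rw [hnil] at this; simp at this
      rw [pvGoB_false cap _ _ 0 hBne (by rw [hlen, hlen]; omega)]
      -- A's side: the first merged event already overflows a capacity < -1
      rcases hss : PySem.List.sorted (((g :: gs).map (fun g =>
          PySem.Dict.getD (PySem.Dict.ofList g) "check-in" 0))) (fun x => x) with _ | ⟨s, ss⟩
      · exact absurd hss hBne
      · rcases hes : PySem.List.sorted (((g :: gs).map (fun g =>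
            PySem.Dict.getD (PySem.Dict.ofList g) "check-out" 0))) (fun x => x) with _ | ⟨e, es⟩
        · have := hlen (fun g => PySem.Dict.getD (PySem.Dict.ofList g) "check-out" 0)
          rw [hes] at this; simp at this
        · rw [pvMergeP_cons_cons]
          by_cases he : e ≤ s
          · rw [if_pos he, pvLoopA, if_pos (by omega)]
          · rw [if_neg he, pvLoopA, if_pos (by omega)]
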